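-- pv_equiv track=rewrite | github.com/JorG96/PythonGraphs | IsTadpole.py | solution
-- ===== SOURCE A (Python) =====
-- def solution(adj):
--     # A graph is a tadpole iff the graph has the degree
--     # sequence 1, 2, 2, ..., 2, 2, 3 and is connected.
--
--     expectedDegseq = [2] * len(adj)
--     expectedDegseq[0] = 1
--     expectedDegseq[-1] = 3
--
--     if sorted(sum(row) for row in adj) != expectedDegseq:
--         return False
--
--     # Check that the graph is connected.
--     q = [0]
--     seen = {0}
--     while q:
--         u = q.pop(0)
--         for v in range(len(adj)):
--             if adj[u][v] and v not in seen:
--                 q.append(v)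
--                 seen.add(v)
--
--     return len(seen) == len(adj)
-- ===== SOURCE B (Python) =====
-- def solution(adj):
--     # Same degree-sequence test as the original; connectivity is then decided by
--     # round-based saturation (n rounds of adding all out-neighbours of the
--     # current set) instead of a queue-driven BFS.
--     n = len(adj)
--     expectedDegseq = [2] * n
--     expectedDegseq[0] = 1
--     expectedDegseq[-1] = 3
--
--     if sorted(sum(row) for row in adj) != expectedDegseq:
--         return False
--
--     seen = {0}
--     for _ in range(n):
--         seen = seen | {v for u in seen for v in range(n) if adj[u][v]}
--
--     return len(seen) == n
-- ===== Notes on version B (the rewrite author's own statement) =====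
-- stated objective: alternative
-- what changed: The queue-driven BFS connectivity check is replaced by round-based saturation: n rounds of unioning the seen set with all out-neighbours of its members, with no queue and no per-node pop; the degree-sequence test is kept as in A.
-- outside the precondition, e.g. on solution([[0, 1, 0], [1, 1, 0], [3]]): A returns False, B returns False
import Mathlib
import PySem

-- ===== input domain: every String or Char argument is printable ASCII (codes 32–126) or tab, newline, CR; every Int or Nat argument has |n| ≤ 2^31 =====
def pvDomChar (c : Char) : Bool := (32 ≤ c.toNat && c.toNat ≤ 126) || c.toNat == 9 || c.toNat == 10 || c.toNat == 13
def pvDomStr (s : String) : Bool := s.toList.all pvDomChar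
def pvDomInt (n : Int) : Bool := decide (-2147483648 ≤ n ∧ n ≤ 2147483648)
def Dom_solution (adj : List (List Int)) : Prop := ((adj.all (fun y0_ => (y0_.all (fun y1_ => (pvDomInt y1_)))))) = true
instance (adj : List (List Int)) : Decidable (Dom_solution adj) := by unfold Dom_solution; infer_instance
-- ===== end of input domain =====

-- B replaces A's queue-driven BFS connectivity check by round-based saturation of the seen set
-- (no queue); the degree-sequence test is unchanged. Return-value equivalence is proved on Pre_.

-- adj[u][v], total form; exact where the ports use it under Pre_ (indices in range)
def pyAt (adj : List (List Int)) (u v : Int) : Int :=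
  PySem.List.pyGetD (PySem.List.pyGetD adj u []) v 0

-- ===== PORT A =====
-- the while-loop of A over q/seen; fuel = adj.length bounds the number of pops (every popped node
-- was enqueued exactly once and the enqueued nodes are distinct members of range(n)), see bfsLoopA_spec
def bfsLoopA (adj : List (List Int)) : Nat → List Int → List Int → List Int
  | 0, _, seen => seen
  | fuel+1, q, seen =>
    match q with
    | [] => seen
    | u :: qrest =>
      let st := (PySem.List.pyRange 0 adj.length 1).foldl
        (fun (p : List Int × List Int) v =>
          if pyAt adj u v ≠ 0 ∧ v ∉ p.2 then (p.1 ++ [v], p.2 ++ [v]) else p)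
        (qrest, seen)
      bfsLoopA adj fuel st.1 st.2

def solution (adj : List (List Int)) : Bool :=
  let n := adj.length
  let expected := PySem.List.pySetD (PySem.List.pySetD (List.replicate n (2 : Int)) 0 1) (-1) 3
  if PySem.List.sorted (adj.map (fun row => row.sum)) (fun x => x) false ≠ expected then false
  else
    let seen := bfsLoopA adj n [0] [0]
    decide (seen.length = n)

-- ===== PORT B =====
-- {v for u in seen for v in range(n) if adj[u][v]}
def nbrsB (adj : List (List Int)) (seen : PySem.Set Int) : PySem.Set Int :=
  seen.foldl (fun acc u =>
    (PySem.List.pyRange 0 adj.length 1).foldl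
      (fun acc2 v => if pyAt adj u v ≠ 0 then PySem.Set.add acc2 v else acc2) acc)
    PySem.Set.empty

-- seen = seen | {…}
def stepB (adj : List (List Int)) (seen : PySem.Set Int) : PySem.Set Int :=
  PySem.Set.union seen (nbrsB adj seen)

def solution_alt (adj : List (List Int)) : Bool :=
  let n := adj.length
  let expected := PySem.List.pySetD (PySem.List.pySetD (List.replicate n (2 : Int)) 0 1) (-1) 3
  if PySem.List.sorted (adj.map (fun row => row.sum)) (fun x => x) false ≠ expected then false
  else
    let seen := (List.range n).foldl (fun s _ => stepB adj s) (PySem.Set.ofList [(0 : Int)])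
    decide (seen.length = n)

-- ===== PRECONDITION & SPEC =====
-- Pre_ excludes the empty matrix (A raises IndexError on expectedDegseq[0]) and matrices that PASS the
-- degree-sequence test while having a row shorter than n, on which the traversal may raise IndexError;
-- degree-failing matrices are admitted regardless of shape (both programs return False before indexing
-- any entry). This is slightly narrower than A's exact domain: a short row whose node is never reached
-- from node 0 does not raise (see the cite in claim.json); B returns the same value there.
def Pre_solution (adj : List (List Int)) : Prop :=
  adj ≠ [] ∧
  (PySem.List.sorted (adj.map (fun row => row.sum)) (fun x => x) false ≠
      PySem.List.pySetD (PySem.List.pySetD (List.replicate adj.length (2 : Int)) 0 1) (-1) 3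
    ∨ ∀ row ∈ adj, adj.length ≤ row.length)
instance (adj : List (List Int)) : Decidable (Pre_solution adj) := by unfold Pre_solution; infer_instance

def pvWitness_solution : List (List Int) := [[0, 1, 0], [1, 0, 1], [0, 1, 1]]

def Spec_solution (adj : List (List Int)) (out : Bool) : Prop := out = solution_alt adj
instance (adj : List (List Int)) (out : Bool) : Decidable (Spec_solution adj out) := by unfold Spec_solution; infer_instance

-- ===== CLAIM (what is proved, stated in full; the proofs are below) =====
def Claim_equal_solution : Prop := ∀ (adj : List (List Int)), Dom_solution adj → Pre_solution adj → Spec_solution adj (solution adj)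

-- ===== LEMMAS AND PROOFS =====

-- the edge relation both traversals follow, and the reachable set from node 0
def Edge (adj : List (List Int)) (u v : Int) : Prop :=
  0 ≤ v ∧ v < (adj.length : Int) ∧ pyAt adj u v ≠ 0

inductive Reach (adj : List (List Int)) : Int → Prop
  | base : Reach adj 0
  | step {u v : Int} : Reach adj u → Edge adj u v → Reach adj v

def InB (adj : List (List Int)) (x : Int) : Prop := 0 ≤ x ∧ x < (adj.length : Int)

theorem len_le_n (adj : List (List Int)) (l : List Int) (hnd : l.Nodup)
    (hb : ∀ x ∈ l, InB adj x) : l.length ≤ adj.length := by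
  have sub : l ⊆ PySem.List.pyRange 0 adj.length 1 := by
    intro x hx
    exact (PySem.List.mem_pyRange_one).mpr ⟨(hb x hx).1, (hb x hx).2⟩
  have := (hnd.subperm sub).length_le
  rwa [PySem.List.length_pyRange_one, show ((adj.length : Int) - 0).toNat = adj.length by omega] at this

-- ---- A side: one pass of the inner for-loop, then the while-loop ----

theorem foldA_spec (adj : List (List Int)) (u : Int) (vs : List Int)
    (hvs : ∀ v ∈ vs, 0 ≤ v ∧ v < (adj.length : Int)) :
    ∀ (qr s : List Int), s.Nodup →
    ∃ Δ, (vs.foldl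
        (fun (p : List Int × List Int) v =>
          if pyAt adj u v ≠ 0 ∧ v ∉ p.2 then (p.1 ++ [v], p.2 ++ [v]) else p)
        (qr, s)) = (qr ++ Δ, s ++ Δ) ∧
      (s ++ Δ).Nodup ∧
      (∀ x ∈ Δ, Edge adj u x ∧ x ∉ s) ∧
      (∀ v ∈ vs, pyAt adj u v ≠ 0 → v ∈ s ++ Δ) := by
  induction vs with
  | nil => intro qr s hs; exact ⟨[], by simp, by simpa using hs, by simp, by simp⟩
  | cons v vs ih =>
    intro qr s hs
    have hv := hvs v (by simp)
    have hvs' : ∀ w ∈ vs, 0 ≤ w ∧ w < (adj.length : Int) := fun w hw => hvs w (by simp [hw])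
    simp only [List.foldl_cons]
    by_cases hc : pyAt adj u v ≠ 0 ∧ v ∉ s
    · rw [if_pos hc]
      obtain ⟨Δ, heq, hnd, hmem, hcov⟩ := (ih hvs') (qr ++ [v]) (s ++ [v])
        (by simp only [List.nodup_append, List.nodup_singleton]
            refine ⟨hs, trivial, ?_⟩; intro a ha b hb; simp at hb; subst hb
            exact fun hh => hc.2 (hh ▸ ha))
      refine ⟨v :: Δ, ?_, ?_, ?_, ?_⟩
      · simpa [List.append_assoc] using heq
      · simpa [List.append_assoc] using hnd
      · intro x hx
        rcases List.mem_cons.mp hx with rfl | hx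
        · exact ⟨⟨hv.1, hv.2, hc.1⟩, hc.2⟩
        · obtain ⟨he, hn⟩ := hmem x hx
          exact ⟨he, fun hxs => hn (by simp [hxs])⟩
      · intro w hw hwne
        rcases List.mem_cons.mp hw with rfl | hw
        · simp
        · have := hcov w hw hwne
          simpa [List.append_assoc] using this
    · rw [if_neg hc]
      obtain ⟨Δ, heq, hnd, hmem, hcov⟩ := (ih hvs') qr s hs
      refine ⟨Δ, heq, hnd, hmem, ?_⟩
      intro w hw hwne
      rcases List.mem_cons.mp hw with rfl | hw
      · have : w ∈ s := by
          by_contra hns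
          exact hc ⟨hwne, hns⟩
        exact List.mem_append_left _ this
      · exact hcov w hw hwne

theorem bfsLoopA_spec (adj : List (List Int)) :
    ∀ (fuel : Nat) (q seen : List Int),
      seen.Nodup → q.Nodup → (∀ x ∈ q, x ∈ seen) →
      (∀ x ∈ seen, InB adj x ∧ Reach adj x) →
      (∀ u ∈ seen, u ∉ q → ∀ v, Edge adj u v → v ∈ seen) →
      q.length + (adj.length - seen.length) ≤ fuel →
      (bfsLoopA adj fuel q seen).Nodup ∧
      (∀ x ∈ seen, x ∈ bfsLoopA adj fuel q seen) ∧
      (∀ x ∈ bfsLoopA adj fuel q seen, Reach adj x) ∧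
      (∀ u ∈ bfsLoopA adj fuel q seen, ∀ v, Edge adj u v → v ∈ bfsLoopA adj fuel q seen) := by
  intro fuel
  induction fuel with
  | zero =>
    intro q seen hsnd hqnd hqs hsR hcl hfuel
    have hq : q = [] := by
      cases q with
      | nil => rfl
      | cons a t => simp at hfuel
    subst hq
    simp only [bfsLoopA]
    exact ⟨hsnd, fun x hx => hx, fun x hx => (hsR x hx).2,
      fun u hu v he => hcl u hu (by simp) v he⟩
  | succ fuel ih =>
    intro q seen hsnd hqnd hqs hsR hcl hfuel
    cases q with
    | nil =>
      simp only [bfsLoopA]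
      exact ⟨hsnd, fun x hx => hx, fun x hx => (hsR x hx).2,
        fun u hu v he => hcl u hu (by simp) v he⟩
    | cons u qrest =>
      simp only [bfsLoopA]
      obtain ⟨Δ, heq, hnd, hΔ, hcov⟩ := foldA_spec adj u (PySem.List.pyRange 0 adj.length 1)
        (fun v hv => (PySem.List.mem_pyRange_one).mp hv) qrest seen hsnd
      rw [heq]
      have huseen : u ∈ seen := hqs u (by simp)
      have hqrest_sub : ∀ x ∈ qrest, x ∈ seen := fun x hx => hqs x (by simp [hx])
      have hΔfresh : ∀ x ∈ Δ, x ∉ seen := fun x hx => (hΔ x hx).2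
      have hΔnd : Δ.Nodup := (List.nodup_append.mp hnd).2.1
      have hqnd' : (qrest ++ Δ).Nodup := by
        rw [List.nodup_append]
        refine ⟨(List.nodup_cons.mp hqnd).2, hΔnd, ?_⟩
        intro a ha b hb hab
        exact hΔfresh b hb (hab ▸ hqrest_sub a ha)
      have hqs' : ∀ x ∈ qrest ++ Δ, x ∈ seen ++ Δ := by
        intro x hx
        rcases List.mem_append.mp hx with hx | hx
        · exact List.mem_append_left _ (hqrest_sub x hx)
        · exact List.mem_append_right _ hx
      have hsR' : ∀ x ∈ seen ++ Δ, InB adj x ∧ Reach adj x := by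
        intro x hx
        rcases List.mem_append.mp hx with hx | hx
        · exact hsR x hx
        · obtain ⟨he, _⟩ := hΔ x hx
          exact ⟨⟨he.1, he.2.1⟩, Reach.step (hsR u huseen).2 he⟩
      have hcl' : ∀ w ∈ seen ++ Δ, w ∉ qrest ++ Δ → ∀ v, Edge adj w v → v ∈ seen ++ Δ := by
        intro w hw hwq v he
        rcases List.mem_append.mp hw with hw | hw
        · by_cases hwu : w = u
          · subst hwu
            exact hcov v ((PySem.List.mem_pyRange_one).mpr ⟨he.1, he.2.1⟩) he.2.2
          · have hwq2 : w ∉ u :: qrest := by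
              intro hc
              rcases List.mem_cons.mp hc with rfl | hc
              · exact hwu rfl
              · exact hwq (List.mem_append_left _ hc)
            exact List.mem_append_left _ (hcl w hw hwq2 v he)
        · exact absurd (List.mem_append_right qrest hw) hwq
      have hlen : (seen ++ Δ).length ≤ adj.length :=
        len_le_n adj _ hnd (fun x hx => (hsR' x hx).1)
      have hfuel' : (qrest ++ Δ).length + (adj.length - (seen ++ Δ).length) ≤ fuel := by
        simp only [List.length_append, List.length_cons] at hfuel hlen ⊢
        omega
      obtain ⟨c1, c2, c3, c4⟩ := ih (qrest ++ Δ) (seen ++ Δ) hnd hqnd' hqs' hsR' hcl' hfuel'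
      exact ⟨c1, fun x hx => c2 x (List.mem_append_left _ hx), c3, c4⟩

-- ---- B side: the neighbour-set comprehension, one saturation round, and the n rounds ----

theorem mem_innerB (adj : List (List Int)) (u : Int) (acc : List Int) (x : Int) :
    x ∈ (PySem.List.pyRange 0 adj.length 1).foldl
      (fun acc2 v => if pyAt adj u v ≠ 0 then PySem.Set.add acc2 v else acc2) acc ↔
    x ∈ acc ∨ Edge adj u x := by
  rw [PySem.List.foldl_ite_eq_foldl_filter]
  rw [show ∀ l : List Int, List.foldl PySem.Set.add acc l = PySem.Set.update acc l from fun _ => rfl]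
  rw [PySem.Set.mem_update]
  simp only [List.mem_filter, PySem.List.mem_pyRange_one, Edge, decide_eq_true_eq]
  tauto

theorem mem_nbrsB (adj : List (List Int)) (seen : List Int) (x : Int) :
    x ∈ nbrsB adj seen ↔ ∃ u ∈ seen, Edge adj u x := by
  unfold nbrsB
  suffices h : ∀ acc : List Int, x ∈ seen.foldl (fun acc u =>
      (PySem.List.pyRange 0 adj.length 1).foldl
        (fun acc2 v => if pyAt adj u v ≠ 0 then PySem.Set.add acc2 v else acc2) acc) acc ↔
      x ∈ acc ∨ ∃ u ∈ seen, Edge adj u x by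
    simpa [PySem.Set.empty] using h []
  induction seen with
  | nil => intro acc; simp
  | cons u us ih =>
    intro acc
    simp only [List.foldl_cons, ih, mem_innerB]
    constructor
    · rintro (h | h)
      · rcases h with h | h
        · exact Or.inl h
        · exact Or.inr ⟨u, by simp, h⟩
      · obtain ⟨w, hw, he⟩ := h
        exact Or.inr ⟨w, by simp [hw], he⟩
    · rintro (h | ⟨w, hw, he⟩)
      · exact Or.inl (Or.inl h)
      · rcases List.mem_cons.mp hw with rfl | hw
        · exact Or.inl (Or.inr he)
        · exact Or.inr ⟨w, hw, he⟩

theorem stepB_append (adj : List (List Int)) (s : List Int) :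
    ∃ Δ, stepB adj s = s ++ Δ ∧ (∀ x ∈ Δ, x ∉ s) := by
  unfold stepB
  rw [show ∀ t : List Int, PySem.Set.union s t = PySem.Set.update s t from fun _ => rfl]
  rw [PySem.Set.update_eq_append_filter]
  refine ⟨_, rfl, ?_⟩
  intro x hx
  have := List.of_mem_filter hx
  simp only [Bool.not_eq_true'] at this
  intro hxs
  rw [PySem.Set.contains_eq_listContains] at this
  simp at this
  exact this hxs

theorem mem_stepB (adj : List (List Int)) (s : List Int) (x : Int) :
    x ∈ stepB adj s ↔ x ∈ s ∨ ∃ u ∈ s, Edge adj u x := by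
  unfold stepB
  rw [PySem.Set.mem_union, mem_nbrsB]

theorem nodup_stepB (adj : List (List Int)) (s : List Int) (h : s.Nodup) : (stepB adj s).Nodup := by
  unfold stepB
  exact PySem.Set.nodup_union _ _ h

def iterB (adj : List (List Int)) (k : Nat) : List Int :=
  (List.range k).foldl (fun s _ => stepB adj s) (PySem.Set.ofList [(0 : Int)])

theorem iterB_zero (adj : List (List Int)) : iterB adj 0 = [0] := rfl

theorem iterB_succ (adj : List (List Int)) (k : Nat) :
    iterB adj (k + 1) = stepB adj (iterB adj k) := by
  simp [iterB, List.range_succ]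

theorem closed_of_stepB_eq (adj : List (List Int)) (s : List Int) (h : stepB adj s = s) :
    ∀ u ∈ s, ∀ v, Edge adj u v → v ∈ s := by
  intro u hu v he
  have : v ∈ stepB adj s := (mem_stepB adj s v).mpr (Or.inr ⟨u, hu, he⟩)
  rwa [h] at this

theorem iterB_nodup (adj : List (List Int)) (k : Nat) : (iterB adj k).Nodup := by
  induction k with
  | zero => simp [iterB_zero]
  | succ k ih => rw [iterB_succ]; exact nodup_stepB adj _ ih

theorem iterB_inv (adj : List (List Int)) (h0 : adj ≠ []) (k : Nat) :
    ∀ x ∈ iterB adj k, InB adj x ∧ Reach adj x := by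
  induction k with
  | zero =>
    intro x hx
    rw [iterB_zero] at hx
    simp at hx
    subst hx
    have : 0 < adj.length := List.length_pos_iff.mpr h0
    exact ⟨⟨le_refl 0, by exact_mod_cast this⟩, Reach.base⟩
  | succ k ih =>
    intro x hx
    rw [iterB_succ, mem_stepB] at hx
    rcases hx with hx | ⟨u, hu, he⟩
    · exact ih x hx
    · exact ⟨⟨he.1, he.2.1⟩, Reach.step (ih u hu).2 he⟩

theorem iterB_mono (adj : List (List Int)) (k : Nat) : ∀ x ∈ iterB adj k, x ∈ iterB adj (k + 1) := by
  intro x hx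
  rw [iterB_succ, mem_stepB]
  exact Or.inl hx

theorem iterB_claimK (adj : List (List Int)) (k : Nat) :
    stepB adj (iterB adj k) = iterB adj k ∨ k + 1 ≤ (iterB adj k).length := by
  induction k with
  | zero => exact Or.inr (by simp [iterB_zero])
  | succ k ih =>
    rcases ih with h | h
    · left; rw [iterB_succ, h, h]
    · by_cases he : stepB adj (iterB adj k) = iterB adj k
      · left; rw [iterB_succ, he, he]
      · right
        obtain ⟨Δ, heq, _⟩ := stepB_append adj (iterB adj k)
        rcases Δ with _ | ⟨d, Δ⟩
        · exact absurd (by simpa using heq) he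
        · rw [iterB_succ, heq]
          simp only [List.length_append, List.length_cons]
          omega

theorem iterB_closed (adj : List (List Int)) (h0 : adj ≠ []) :
    ∀ u ∈ iterB adj adj.length, ∀ v, Edge adj u v → v ∈ iterB adj adj.length := by
  rcases iterB_claimK adj adj.length with h | h
  · exact closed_of_stepB_eq adj _ h
  · exfalso
    have := len_le_n adj _ (iterB_nodup adj adj.length)
      (fun x hx => (iterB_inv adj h0 adj.length x hx).1)
    omega

theorem iterB_zero_mem (adj : List (List Int)) (k : Nat) : (0 : Int) ∈ iterB adj k := by
  induction k with
  | zero => simp [iterB_zero]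
  | succ k ih => exact iterB_mono adj k 0 ih

theorem iterB_complete (adj : List (List Int)) (h0 : adj ≠ []) :
    ∀ x, Reach adj x → x ∈ iterB adj adj.length := by
  intro x hx
  induction hx with
  | base => exact iterB_zero_mem adj adj.length
  | step hr he ih => exact iterB_closed adj h0 _ ih _ he

-- ---- assembly: both traversals compute the reachable set, hence lists of equal length ----

theorem traversals_same_length (adj : List (List Int)) (h0 : adj ≠ []) :
    (bfsLoopA adj adj.length [0] [0]).length = (iterB adj adj.length).length := by
  have hn : 0 < adj.length := List.length_pos_iff.mpr h0
  obtain ⟨And, Amem, Asound, Aclosed⟩ := bfsLoopA_spec adj adj.length [0] [0]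
    (by simp) (by simp) (fun x hx => hx)
    (by intro x hx; simp at hx; subst hx
        exact ⟨⟨le_refl 0, by exact_mod_cast hn⟩, Reach.base⟩)
    (by intro u hu hnq v he; simp at hu; subst hu; simp at hnq)
    (by simp; omega)
  have Acomp : ∀ x, Reach adj x → x ∈ bfsLoopA adj adj.length [0] [0] := by
    intro x hx
    induction hx with
    | base => exact Amem 0 (by simp)
    | step hr he ih => exact Aclosed _ ih _ he
  have hmem : ∀ x : Int, x ∈ bfsLoopA adj adj.length [0] [0] ↔ x ∈ iterB adj adj.length := by
    intro x
    constructor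
    · intro hx; exact iterB_complete adj h0 x (Asound x hx)
    · intro hx; exact Acomp x (iterB_inv adj h0 adj.length x hx).2
  exact ((List.perm_ext_iff_of_nodup And (iterB_nodup adj adj.length)).mpr hmem).length_eq

-- ===== VERDICT (by name: the statement is the Claim_ definition above) =====
theorem solution_spec : Claim_equal_solution := by
  intro adj _ hpre
  unfold Spec_solution solution solution_alt
  by_cases hc : PySem.List.sorted (adj.map (fun row => row.sum)) (fun x => x) false ≠
      PySem.List.pySetD (PySem.List.pySetD (List.replicate adj.length (2 : Int)) 0 1) (-1) 3
  · rw [if_pos hc, if_pos hc]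
  · rw [if_neg hc, if_neg hc]
    rw [show (List.range adj.length).foldl (fun s _ => stepB adj s) (PySem.Set.ofList [(0 : Int)])
        = iterB adj adj.length from rfl]
    show decide ((bfsLoopA adj adj.length [0] [0]).length = adj.length)
        = decide ((iterB adj adj.length).length = adj.length)
    rw [traversals_same_length adj hpre.1]
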